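-- pv_equiv track=rewrite | github.com/donaldng/tweet-feed | feed.py | goodTweet
-- ===== SOURCE A (Python) =====
-- def goodTweet(text, exclude):
--     # Tweet filtering
--     isGoodTweet = True
--     dollartagCount = 0
--     hashtagCount = 0
--     textList = text.replace("\n", " ").split(" ")
--
--     if "https://" in text or "http://" in text:
--         isGoodTweet = False
--
--     if exclude and isGoodTweet:
--         exceptList = exclude.replace(" ,", ",").replace(", ", ",").split(",")
--         for ex in exceptList:
--             if ex in text:
--                 isGoodTweet = False
--
--     for kw in textList:
--         if not isGoodTweet:
--             break
--
--         # Ignore tweet with public ethereum address on it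
--         if kw.startswith("0x") and len(kw) > 30:
--             isGoodTweet = False
--
--         # Count hash tag (#)
--         if kw.startswith("#"):
--             hashtagCount += 1
--
--         # Count dollar sign tag ($)
--         if kw.startswith("$"):
--             dollartagCount += 1
--
--         # Skip spam msg and ads
--         if hashtagCount > 5 or dollartagCount > 3:
--             isGoodTweet = False
--
--     return isGoodTweet
-- ===== SOURCE B (Python) =====
-- def goodTweet(text, exclude):
--     # Character-level streaming scanner: no token list is built; the current token
--     # is summarized only by its length and its first-two-character prefix.
--     if "https://" in text or "http://" in text:
--         return False
--     if exclude:
--         for ex in exclude.replace(" ,", ",").replace(", ", ",").split(","):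
--             if ex in text:
--                 return False
--     hashtags = 0
--     dollars = 0
--     tok_len = 0
--     prefix = ""
--     for ch in text + " ":
--         if ch == "\n":
--             ch = " "
--         if ch == " ":
--             if prefix.startswith("0x") and tok_len > 30:
--                 return False
--             if prefix.startswith("#"):
--                 hashtags += 1
--             elif prefix.startswith("$"):
--                 dollars += 1
--             tok_len = 0
--             prefix = ""
--         else:
--             if tok_len < 2:
--                 prefix += ch
--             tok_len += 1
--     return hashtags <= 5 and dollars <= 3
-- ===== Notes on version B (the rewrite author's own statement) =====
-- stated objective: alternative
-- what changed: Replaced A's replace+split tokenization and token loop by a character-level streaming state machine over text+' ' that never builds a token list, summarizing the current token by only its length and first-two-character prefix, with early returns instead of an accumulating flag.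
import Mathlib
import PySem

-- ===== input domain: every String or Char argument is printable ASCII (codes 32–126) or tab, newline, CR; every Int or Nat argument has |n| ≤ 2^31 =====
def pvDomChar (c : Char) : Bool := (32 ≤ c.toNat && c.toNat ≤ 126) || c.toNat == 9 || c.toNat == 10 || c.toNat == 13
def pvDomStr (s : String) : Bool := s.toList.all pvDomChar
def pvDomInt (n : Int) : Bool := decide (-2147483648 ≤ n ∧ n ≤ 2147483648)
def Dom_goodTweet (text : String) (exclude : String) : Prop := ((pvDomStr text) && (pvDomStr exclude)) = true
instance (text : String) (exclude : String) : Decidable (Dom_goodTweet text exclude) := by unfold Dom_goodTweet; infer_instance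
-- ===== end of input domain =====

-- B replaces A's replace+split tokenization and accumulating-flag token loop by a character-level
-- streaming state machine over text+" " that keeps only the current token's length and 2-char prefix
-- (objective: alternative).


-- s.split(sep) for a non-empty literal sep: Str.split? is none only for sep = "", so getD never fires
def pvSplit (s : String) (sep : String) : List String := (PySem.Str.split? s sep).getD []

-- ===== PORT A =====
-- the 'for kw in textList' loop of A, with its top-of-body 'if not isGoodTweet: break'
def pvLoopA : List String → Bool → Nat → Nat → Bool
  | [], g, _, _ => g
  | kw :: rest, g, h, d =>
    if g = false then g
    else
      let g1 := if PySem.Str.startswith kw "0x" && decide (30 < PySem.Str.len kw) then false else g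
      let h1 := if PySem.Str.startswith kw "#" then h + 1 else h
      let d1 := if PySem.Str.startswith kw "$" then d + 1 else d
      let g2 := if 5 < h1 ∨ 3 < d1 then false else g1
      pvLoopA rest g2 h1 d1

def goodTweet (text : String) (exclude : String) : Bool :=
  let isGood0 := true
  let textList := pvSplit (PySem.Str.replace text "\n" " ") " "
  let isGood1 :=
    if PySem.Str.isIn "https://" text || PySem.Str.isIn "http://" text then false else isGood0
  let isGood2 :=
    if decide (exclude ≠ "") && isGood1 then
      (pvSplit (PySem.Str.replace (PySem.Str.replace exclude " ," ",") ", " ",") ",").foldl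
        (fun g ex => if PySem.Str.isIn ex text then false else g) isGood1
    else isGood1
  pvLoopA textList isGood2 0 0

-- ===== PORT B =====
-- Source B's 'for ex in …: if ex in text: return False' loop
def pvExcB : List String → String → Bool
  | [], _ => false
  | ex :: rest, text => if PySem.Str.isIn ex text then true else pvExcB rest text

-- Source B's character loop over text + " ": state = tag counts, current token length, ≤2-char prefix
def pvScanB : List Char → Nat → Nat → Nat → List Char → Bool
  | [], h, d, _, _ => decide (h ≤ 5) && decide (d ≤ 3)
  | c :: rest, h, d, len, pre =>
    let ch := if c = '\n' then ' ' else c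
    if ch = ' ' then
      if PySem.Chars.startswith pre ['0', 'x'] && decide (30 < len) then false
      else if PySem.Chars.startswith pre ['#'] then pvScanB rest (h + 1) d 0 []
      else if PySem.Chars.startswith pre ['$'] then pvScanB rest h (d + 1) 0 []
      else pvScanB rest h d 0 []
    else
      pvScanB rest h d (len + 1) (if len < 2 then pre ++ [ch] else pre)

def goodTweet_alt (text : String) (exclude : String) : Bool :=
  if PySem.Str.isIn "https://" text || PySem.Str.isIn "http://" text then false
  else if decide (exclude ≠ "") &&
      pvExcB (pvSplit (PySem.Str.replace (PySem.Str.replace exclude " ," ",") ", " ",") ",") text then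
    false
  else pvScanB (text.toList ++ [' ']) 0 0 0 []

-- ===== PRECONDITION & SPEC =====
def Spec_goodTweet (text : String) (exclude : String) (out : Bool) : Prop := out = goodTweet_alt text exclude
instance (text : String) (exclude : String) (out : Bool) : Decidable (Spec_goodTweet text exclude out) := by unfold Spec_goodTweet; infer_instance

-- ===== CLAIM (what is proved, stated in full; the proofs are below) =====
def Claim_equal_goodTweet : Prop := ∀ (text : String) (exclude : String), Dom_goodTweet text exclude → Spec_goodTweet text exclude (goodTweet text exclude)

-- ===== LEMMAS AND PROOFS =====

-- '\n' → ' ' as a character map (what text.replace("\n", " ") does pointwise)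
def pvRepl (c : Char) : Char := if c = '\n' then ' ' else c

-- split on a single space, current token carried forwards
def pvTokens : List Char → List Char → List (List Char)
  | [], cur => [cur]
  | c :: rest, cur => if c = ' ' then cur :: pvTokens rest [] else pvTokens rest (cur ++ [c])

-- token-level reading of B's scan
def pvProcAll : List (List Char) → Nat → Nat → Bool
  | [], h, d => decide (h ≤ 5) && decide (d ≤ 3)
  | t :: ts, h, d =>
    if List.isPrefixOf ['0', 'x'] t && decide (30 < t.length) then false
    else if List.isPrefixOf ['#'] t then pvProcAll ts (h + 1) d
    else if List.isPrefixOf ['$'] t then pvProcAll ts h (d + 1)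
    else pvProcAll ts h d

theorem pvDecideShift (a c n : Nat) : decide (a + 1 + c ≤ n) = decide (a + (c + 1) ≤ n) := by
  simp only [decide_eq_decide]; omega

theorem pvLoopA_false (ts : List String) (h d : Nat) : pvLoopA ts false h d = false := by
  cases ts <;> simp [pvLoopA]

theorem pvLoopA_true (ts : List String) (h d : Nat) (hh : h ≤ 5) (hd : d ≤ 3) :
    pvLoopA ts true h d =
      (!(ts.any (fun t => PySem.Str.startswith t "0x" && decide (30 < PySem.Str.len t))) &&
        decide (h + (ts.filter (fun t => PySem.Str.startswith t "#")).length ≤ 5) &&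
        decide (d + (ts.filter (fun t => PySem.Str.startswith t "$")).length ≤ 3)) := by
  induction ts generalizing h d with
  | nil => simp [pvLoopA, hh, hd]
  | cons kw rest ih =>
    cases hbv : (PySem.Str.startswith kw "0x" && decide (30 < PySem.Str.len kw)) <;>
    cases h1v : PySem.Str.startswith kw "#" <;>
    cases d1v : PySem.Str.startswith kw "$" <;>
      simp only [pvLoopA, List.any_cons, List.filter_cons, hbv, h1v, d1v, if_true, if_false,
        Bool.false_eq_true, Bool.true_eq_false, Bool.false_or, Bool.true_or,
        Bool.not_true, List.length_cons, Bool.false_and] <;>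
      split_ifs with hc
    all_goals try (exact absurd hc (by omega))
    all_goals try rw [pvLoopA_false]
    all_goals try (rw [ih _ _ (by omega) (by omega)]; first | rfl | simp only [pvDecideShift])
    all_goals simp_all
    all_goals omega

theorem pvFoldFalse (text : String) (l : List String) :
    l.foldl (fun g ex => if PySem.Str.isIn ex text then false else g) false = false := by
  induction l with
  | nil => rfl
  | cons y ys ih => simp only [List.foldl_cons]; split_ifs <;> exact ih

theorem pvExcludeFold (text : String) (l : List String) :
    l.foldl (fun g ex => if PySem.Str.isIn ex text then false else g) true =
      !(pvExcB l text) := by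
  induction l with
  | nil => rfl
  | cons x xs ih =>
    simp only [List.foldl_cons, pvExcB]
    by_cases hx : PySem.Str.isIn x text = true
    · rw [if_pos hx, pvFoldFalse, if_pos hx, Bool.not_true]
    · rw [if_neg hx, ih, if_neg hx]

-- Chars.replace with single-char old/new is the pointwise map
theorem pvReplaceGo (fuel : Nat) : ∀ (l acc : List Char), l.length ≤ fuel →
    PySem.Chars.replace.go ['\n'] [' '] fuel l acc = acc.reverse ++ l.map pvRepl := by
  induction fuel with
  | zero =>
    intro l acc h
    have hl : l = [] := by cases l <;> simp_all
    subst hl; simp [PySem.Chars.replace.go]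
  | succ n ih =>
    intro l acc h
    cases l with
    | nil => simp [PySem.Chars.replace.go]
    | cons c t =>
      simp only [PySem.Chars.replace.go, List.isPrefixOf, Bool.and_true]
      by_cases hc : c = '\n'
      · subst hc
        simp only [beq_self_eq_true, if_true, List.length_cons, List.length_nil,
          List.drop_succ_cons, List.drop_zero]
        rw [ih t _ (by simpa using h)]
        simp [pvRepl]
      · have : ('\n' == c) = false := by simp [hc]; exact fun hh => hc hh.symm
        simp only [this, Bool.false_eq_true, if_false]
        rw [ih t _ (by simpa using h)]
        simp [pvRepl, hc]

theorem pvReplace_eq (cs : List Char) :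
    PySem.Chars.replace cs ['\n'] [' '] = cs.map pvRepl := by
  have : PySem.Chars.replace cs ['\n'] [' '] = PySem.Chars.replace.go ['\n'] [' '] cs.length cs [] := by
    simp [PySem.Chars.replace]
  rw [this, pvReplaceGo cs.length cs [] le_rfl]
  simp

-- Chars.splitOn on a single space is pvTokens
theorem pvSplitGo (fuel : Nat) : ∀ (l cur : List Char) (acc : List (List Char)), l.length ≤ fuel →
    PySem.Chars.splitOn.go [' '] fuel l cur acc = acc.reverse ++ pvTokens l cur.reverse := by
  induction fuel with
  | zero =>
    intro l cur acc h
    have hl : l = [] := by cases l <;> simp_all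
    subst hl; simp [PySem.Chars.splitOn.go, pvTokens]
  | succ n ih =>
    intro l cur acc h
    cases l with
    | nil => simp [PySem.Chars.splitOn.go, pvTokens]
    | cons c t =>
      simp only [PySem.Chars.splitOn.go, List.isPrefixOf, Bool.and_true]
      by_cases hc : c = ' '
      · subst hc
        simp only [beq_self_eq_true, if_true, List.length_cons, List.length_nil,
          List.drop_succ_cons, List.drop_zero]
        rw [ih t [] _ (by simpa using h)]
        simp [pvTokens]
      · have : (' ' == c) = false := by simp [hc]; exact fun hh => hc hh.symm
        simp only [this, Bool.false_eq_true, if_false]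
        rw [ih t (c :: cur) acc (by simpa using h)]
        simp [pvTokens, hc]

theorem pvSplitOn_eq (cs : List Char) :
    PySem.Chars.splitOn cs [' '] = pvTokens cs [] := by
  have : PySem.Chars.splitOn cs [' '] = PySem.Chars.splitOn.go [' '] (cs.length + 1) cs [] [] := rfl
  rw [this, pvSplitGo (cs.length + 1) cs [] [] (by omega)]
  simp

-- a pattern of length ≤ 2 is a prefix of t.take 2 iff it is a prefix of t
theorem pvPrefixTake (p t : List Char) (hp : p.length ≤ 2) :
    List.isPrefixOf p (t.take 2) = List.isPrefixOf p t := by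
  rcases p with _ | ⟨a, _ | ⟨b, r⟩⟩ <;> rcases t with _ | ⟨x, _ | ⟨y, s⟩⟩ <;>
    simp_all [List.isPrefixOf] <;> omega

theorem pvTake2Append (tok : List Char) (c : Char) :
    (tok ++ [c]).take 2 = if tok.length < 2 then tok.take 2 ++ [c] else tok.take 2 := by
  rcases tok with _ | ⟨a, _ | ⟨b, r⟩⟩ <;> simp

-- prefix tests of length ≤ 2 see only the first two characters
theorem pvPT0x (t : List Char) :
    List.isPrefixOf ['0', 'x'] (t.take 2) = List.isPrefixOf ['0', 'x'] t :=
  pvPrefixTake _ _ (by simp)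

theorem pvPTh (t : List Char) :
    List.isPrefixOf ['#'] (t.take 2) = List.isPrefixOf ['#'] t :=
  pvPrefixTake _ _ (by simp)

theorem pvPTd (t : List Char) :
    List.isPrefixOf ['$'] (t.take 2) = List.isPrefixOf ['$'] t :=
  pvPrefixTake _ _ (by simp)

-- B's char scan computes the token-level fold over the space-split of the '\n'-mapped text
theorem pvScan_eq (cs : List Char) : ∀ (tok : List Char) (h d : Nat),
    pvScanB (cs ++ [' ']) h d tok.length (tok.take 2) =
      pvProcAll (pvTokens (cs.map pvRepl) tok) h d := by
  induction cs with
  | nil =>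
    intro tok h d
    simp only [List.nil_append, List.map_nil, pvScanB, pvTokens, pvProcAll,
      PySem.Chars.startswith, pvPT0x, pvPTh, pvPTd]
    simp
  | cons c rest ih =>
    intro tok h d
    have ih0 : ∀ (h d : Nat), pvScanB (rest ++ [' ']) h d 0 [] =
        pvProcAll (pvTokens (rest.map pvRepl) []) h d := fun h d => by simpa using ih [] h d
    simp only [List.cons_append, List.map_cons, pvScanB, PySem.Chars.startswith,
      pvPT0x, pvPTh, pvPTd]
    by_cases hc : pvRepl c = ' '
    · have hch : (if c = '\n' then ' ' else c) = ' ' := hc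
      simp only [hch, if_pos rfl, hc, pvTokens, if_pos rfl]
      simp only [if_true]
      rw [show pvProcAll (tok :: pvTokens (List.map pvRepl rest) []) h d =
          (if List.isPrefixOf ['0', 'x'] tok && decide (30 < tok.length) then false
           else if List.isPrefixOf ['#'] tok then pvProcAll (pvTokens (List.map pvRepl rest) []) (h + 1) d
           else if List.isPrefixOf ['$'] tok then pvProcAll (pvTokens (List.map pvRepl rest) []) h (d + 1)
           else pvProcAll (pvTokens (List.map pvRepl rest) []) h d) from rfl]
      split_ifs <;> first | rfl | exact ih0 _ _
    · have hch : (if c = '\n' then ' ' else c) = pvRepl c := rfl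
      rw [hch]
      simp only [hc, if_neg hc, pvTokens]
      have h1 : tok.length + 1 = (tok ++ [pvRepl c]).length := by simp
      have h2 : (if tok.length < 2 then tok.take 2 ++ [pvRepl c] else tok.take 2) =
          (tok ++ [pvRepl c]).take 2 := (pvTake2Append tok (pvRepl c)).symm
      rw [h1, h2, ih (tok ++ [pvRepl c]) h d]
      simp only [if_false]

-- closed form of the token-level fold
theorem pvProcAll_closed (ts : List (List Char)) : ∀ (h d : Nat),
    pvProcAll ts h d =
      (!(ts.any (fun t => List.isPrefixOf ['0', 'x'] t && decide (30 < t.length))) &&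
        decide (h + ts.countP (fun t => List.isPrefixOf ['#'] t) ≤ 5) &&
        decide (d + ts.countP (fun t => List.isPrefixOf ['$'] t) ≤ 3)) := by
  induction ts with
  | nil => intro h d; simp [pvProcAll]
  | cons t ts ih =>
    intro h d
    simp only [pvProcAll, List.any_cons, List.countP_cons]
    by_cases hb : (List.isPrefixOf ['0', 'x'] t && decide (30 < t.length)) = true
    · simp [hb]
    · simp only [Bool.not_eq_true] at hb
      simp only [hb, if_false, Bool.false_eq_true, Bool.false_or, reduceIte]
      by_cases hh : List.isPrefixOf ['#'] t = true
      · have hd : List.isPrefixOf ['$'] t = false := by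
          rcases t with _ | ⟨a, r⟩ <;> simp_all [List.isPrefixOf]
          subst hh; decide
        simp only [hh, hd, if_true, if_false, reduceIte, ih]
        rw [pvDecideShift]
        simp
      · simp only [Bool.not_eq_true] at hh
        simp only [hh, Bool.false_eq_true, reduceIte, ih]
        by_cases hd : List.isPrefixOf ['$'] t = true
        · simp only [hd, if_true, reduceIte]
          rw [pvDecideShift]
          simp
        · simp only [Bool.not_eq_true] at hd
          simp [hd]

-- the two token lists coincide (A's strings mapped to char lists)
theorem pvTokensBridge (text : String) :
    (pvSplit (PySem.Str.replace text "\n" " ") " ").map String.toList =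
      pvTokens (text.toList.map pvRepl) [] := by
  have hsep : (" " : String).toList = [' '] := rfl
  have hnl : ("\n" : String).toList = ['\n'] := rfl
  simp only [pvSplit, PySem.Str.split?, PySem.Chars.split?, hsep, List.isEmpty_cons,
    Bool.false_eq_true, if_false, Option.map_some, Option.getD_some, List.map_map]
  rw [show (PySem.Str.replace text "\n" " ").toList = PySem.Chars.replace text.toList ['\n'] [' '] by
    rw [PySem.Str.toList_replace, hnl, hsep]]
  rw [pvReplace_eq, pvSplitOn_eq]
  have : ∀ l : List (List Char), l.map (String.toList ∘ String.ofList) = l := by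
    intro l; induction l with
    | nil => rfl
    | cons x xs ihx => simp_all
  exact this _

-- ===== VERDICT (by name: the statement is the Claim_ definition above) =====
theorem goodTweet_spec : Claim_equal_goodTweet := by
  intro text exclude _
  unfold Spec_goodTweet goodTweet goodTweet_alt
  by_cases hurl : (PySem.Str.isIn "https://" text || PySem.Str.isIn "http://" text) = true
  · simp only [hurl, if_true, Bool.false_eq_true, reduceIte, Bool.and_false]
    rw [pvLoopA_false]
  · simp only [Bool.not_eq_true] at hurl
    simp only [hurl, Bool.false_eq_true, reduceIte, Bool.and_true]
    have hcore : pvLoopA (pvSplit (PySem.Str.replace text "\n" " ") " ") true 0 0 =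
        pvScanB (text.toList ++ [' ']) 0 0 0 [] := by
      rw [pvLoopA_true _ 0 0 (by omega) (by omega)]
      have := pvScan_eq text.toList [] 0 0
      simp only [List.length_nil, List.take_nil] at this
      rw [this, pvProcAll_closed]
      have hb := pvTokensBridge text
      set ts := pvSplit (PySem.Str.replace text "\n" " ") " " with hts
      rw [← hb]
      simp only [List.any_map, List.countP_map, Function.comp_def, PySem.Str.startswith_eq,
        PySem.Chars.startswith, PySem.Str.len_eq, Nat.zero_add]
      rw [show (("0x" : String).toList) = ['0', 'x'] from rfl,
        show (("#" : String).toList) = ['#'] from rfl,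
        show (("$" : String).toList) = ['$'] from rfl]
      simp [List.countP_eq_length_filter]
    by_cases hex : (decide (exclude ≠ "")) = true
    · simp only [hex, Bool.true_and]
      rw [pvExcludeFold]
      by_cases hany : pvExcB (pvSplit (PySem.Str.replace (PySem.Str.replace exclude " ," ",") ", " ",") ",") text = true
      · simp only [hany, Bool.not_true, pvLoopA_false, reduceIte]
      · simp only [Bool.not_eq_true] at hany
        simp only [hany, Bool.not_false, Bool.false_eq_true, reduceIte]
        exact hcore
    · simp only [hex, Bool.false_and, Bool.false_eq_true, reduceIte]
      exact hcore
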